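-- pv_equiv track=rewrite | github.com/tkdgns8234/DataStructure-Algorithm | Algorithm/백준/판교가는길/구간합_구하기/개똥벌레.py | check
-- ===== SOURCE A (Python) =====
-- def check(arr, h): #h 이상의 크기면 부딛힌다, h이상 크기의 갯수를 구하는 이진탐색 함수
--     l, r = 0, len(arr) - 1
--     while l <= r:
--         mid = (l+r)//2
--         if arr[mid] >= h:
--             r = mid - 1
--         elif arr[mid] < h:
--             l = mid + 1
--     return len(arr) - l
-- ===== SOURCE B (Python) =====
-- def check(arr, h):
--     # count of elements >= h; intended for sorted arr (binary search's contract)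
--     return sum(1 for x in arr if x >= h)
-- ===== Notes on version B (the rewrite author's own statement) =====
-- stated objective: simpler
-- what changed: Replaces the hand-written binary-search loop by a one-line linear count of elements >= h; Pre_ excludes arrays not partitioned about the threshold h (some element >= h preceding an element < h, e.g. unsorted data), on which A's returned number is an accident of the probe sequence, outside binary search's natural domain.
-- outside the precondition, e.g. on check([3, 1, 2], 2): A returns 1, B returns 2
import Mathlib
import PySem

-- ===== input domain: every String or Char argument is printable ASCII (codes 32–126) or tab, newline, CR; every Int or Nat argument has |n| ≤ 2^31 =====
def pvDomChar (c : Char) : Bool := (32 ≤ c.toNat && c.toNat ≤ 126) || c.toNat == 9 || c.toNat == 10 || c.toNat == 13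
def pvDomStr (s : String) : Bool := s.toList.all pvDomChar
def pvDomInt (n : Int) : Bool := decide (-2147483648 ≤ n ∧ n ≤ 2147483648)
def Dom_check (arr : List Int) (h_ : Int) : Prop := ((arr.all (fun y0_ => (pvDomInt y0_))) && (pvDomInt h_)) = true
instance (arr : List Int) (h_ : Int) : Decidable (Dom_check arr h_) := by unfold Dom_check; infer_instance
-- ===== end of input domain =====

-- B replaces A's hand-written binary search by a one-line linear count of elements >= h_
-- (simpler; equivalence claimed on sorted arrays, the binary search's natural domain).


-- ===== PORT A =====
-- the while loop, state (l, r); fuel is only a totality guard: the interval length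
-- (r + 1 - l) shrinks every iteration, so fuel = len(arr) + 1 is never exhausted from
-- check's entry state (the fuel-0 line repeats the loop-exit line).
-- arr[mid] is in range whenever l ≤ r with 0 ≤ l and r < len, so `(pyGet? …).getD 0` is
-- exact there.  Python's `elif arr[mid] < h` is exactly the negation of the `if`
-- condition, so it is the else branch.
def checkLoop (arr : List Int) (h_ : Int) : Nat → Int → Int → Int
  | 0, l, _ => (arr.length : Int) - l
  | fuel + 1, l, r =>
    if l ≤ r then
      let mid := PySem.Int.floordiv (l + r) 2
      if (PySem.List.pyGet? arr mid).getD 0 ≥ h_ then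
        checkLoop arr h_ fuel l (mid - 1)
      else
        checkLoop arr h_ fuel (mid + 1) r
    else (arr.length : Int) - l

def check (arr : List Int) (h_ : Int) : Int :=
  checkLoop arr h_ (arr.length + 1) 0 ((arr.length : Int) - 1)

-- ===== PORT B =====
-- sum(1 for x in arr if x >= h) as a left fold over the list
def check_alt (arr : List Int) (h_ : Int) : Int :=
  arr.foldl (fun acc x => if x ≥ h_ then acc + 1 else acc) 0

-- ===== PRECONDITION & SPEC =====
-- Pre_ excludes arrays not partitioned about the threshold h (some element ≥ h before an
-- element < h — e.g. unsorted data; checked linearly on adjacent pairs, which suffices as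
-- the relation is transitive): there A accepts the input but returns a number that
-- is an accident of the probe sequence, outside binary search's natural domain.
def Pre_check (arr : List Int) (h_ : Int) : Prop := List.IsChain (fun a b => h_ ≤ a → h_ ≤ b) arr
instance (arr : List Int) (h_ : Int) : Decidable (Pre_check arr h_) := by unfold Pre_check; infer_instance

def pvWitness_check : List Int × Int := ([1, 2, 2, 5], 2)

def Spec_check (arr : List Int) (h_ : Int) (out : Int) : Prop := out = check_alt arr h_
instance (arr : List Int) (h_ : Int) (out : Int) : Decidable (Spec_check arr h_ out) := by unfold Spec_check; infer_instance

-- ===== CLAIM (what is proved, stated in full; the proofs are below) =====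
def Claim_equal_check : Prop := ∀ (arr : List Int) (h_ : Int), Dom_check arr h_ → Pre_check arr h_ → Spec_check arr h_ (check arr h_)

-- ===== LEMMAS AND PROOFS =====

-- B's fold counts the elements satisfying the predicate
lemma alt_eq_countP (arr : List Int) (h_ : Int) :
    check_alt arr h_ = (arr.countP (fun x => h_ ≤ x) : Int) := by
  unfold check_alt
  suffices h : ∀ (c : Int), arr.foldl (fun acc x => if x ≥ h_ then acc + 1 else acc) c
      = c + (arr.countP (fun x => h_ ≤ x) : Int) by
    simpa using h 0
  induction arr with
  | nil => simp
  | cons a as ih =>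
    intro c
    simp only [List.foldl_cons, List.countP_cons, ih]
    by_cases hc : h_ ≤ a <;> simp [hc] <;> push_cast <;> ring

-- if the first n elements fail p and the rest satisfy it, countP = length - n
lemma countP_split (arr : List Int) (p : Int → Bool) (n : Nat) (hn : n ≤ arr.length)
    (h1 : ∀ i, (hi : i < arr.length) → i < n → ¬ p arr[i])
    (h2 : ∀ i, (hi : i < arr.length) → n ≤ i → p arr[i]) :
    arr.countP p = arr.length - n := by
  conv_lhs => rw [← List.take_append_drop n arr]
  rw [List.countP_append]
  have ht : (arr.take n).countP p = 0 := by
    rw [List.countP_eq_zero]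
    intro x hx
    obtain ⟨i, hi, rfl⟩ := List.mem_iff_getElem.mp hx
    have hil : i < arr.length := by simp at hi; omega
    simp only [List.length_take, lt_min_iff] at hi
    simpa [List.getElem_take] using h1 i hil hi.1
  have hd : (arr.drop n).countP p = (arr.drop n).length := by
    rw [List.countP_eq_length]
    intro x hx
    obtain ⟨i, hi, rfl⟩ := List.mem_iff_getElem.mp hx
    rw [List.getElem_drop]
    exact h2 (n + i) (by simp at hi; omega) (Nat.le_add_right _ _)
  rw [ht, hd]
  simp

-- the loop invariant: everything left of l is < h_, everything right of r is ≥ h_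
lemma loop_eq (arr : List Int) (h_ : Int)
    (hs : ∀ i j, (hi : i < arr.length) → (hj : j < arr.length) → i ≤ j → h_ ≤ arr[i] → h_ ≤ arr[j]) :
    ∀ (fuel : Nat) (l r : Int), 0 ≤ l → r < (arr.length : Int) → l ≤ r + 1 →
    (r + 1 - l).toNat < fuel →
    (∀ i, (hi : i < arr.length) → (i : Int) < l → arr[i] < h_) →
    (∀ i, (hi : i < arr.length) → r < (i : Int) → h_ ≤ arr[i]) →
    checkLoop arr h_ fuel l r = (arr.countP (fun x => h_ ≤ x) : Int) := by
  intro fuel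
  induction fuel with
  | zero => intro l r _ _ _ hf _ _; omega
  | succ fuel ih =>
    intro l r hl0 hrlen hlr1 hf hlo hhi
    rw [checkLoop]
    by_cases hlr : l ≤ r
    · simp only [hlr, if_true]
      have hmid := PySem.Int.floordiv_two_mid_bounds hlr
      set mid := PySem.Int.floordiv (l + r) 2 with hmiddef
      have hm : mid.toNat < arr.length := by omega
      have hsome : PySem.List.pyGet? arr mid = some arr[mid.toNat] :=
        PySem.List.pyGet?_eq_some_getElem arr (by omega) (by omega)
      rw [hsome]
      simp only [Option.getD_some]
      by_cases hget : arr[mid.toNat] ≥ h_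
      · rw [if_pos hget]
        apply ih l (mid - 1) hl0 (by omega) (by omega) (by omega) hlo
        intro i hi hgt
        exact hs mid.toNat i hm hi (by omega) hget
      · rw [if_neg hget]
        rw [not_le] at hget
        apply ih (mid + 1) r (by omega) hrlen (by omega) (by omega) _ hhi
        intro i hi hlt2
        by_contra hcon
        rw [not_lt] at hcon
        exact absurd (hs i mid.toNat hi hm (by omega) hcon) (by omega)
    · simp only [hlr, if_false]
      have hl : l = r + 1 := by omega
      have hln : l.toNat ≤ arr.length := by omega
      rw [countP_split arr _ l.toNat hln]
      · omega
      · intro i hi hilt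
        simpa using not_le.mpr (hlo i hi (by omega))
      · intro i hi hle
        simpa using hhi i hi (by omega)

-- the partition property, read off by index pairs (from the adjacent-pair chain)
lemma part_mono (arr : List Int) (h_ : Int) (hc : List.IsChain (fun a b => h_ ≤ a → h_ ≤ b) arr) :
    ∀ i j, (hi : i < arr.length) → (hj : j < arr.length) → i ≤ j → h_ ≤ arr[i] → h_ ≤ arr[j] := by
  have hadj : ∀ i : Nat, (h : i + 1 < arr.length) → (h_ ≤ arr[i] → h_ ≤ arr[i + 1]) :=
    List.isChain_iff_getElem.mp hc
  have hd : ∀ d i, (hid : i + d < arr.length) → h_ ≤ arr[i]'(by omega) → h_ ≤ arr[i + d] := by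
    intro d
    induction d with
    | zero => intro i hid hx; simpa using hx
    | succ d ih =>
      intro i hid hx
      have h1 : h_ ≤ arr[i + d]'(by omega) := ih i (by omega) hx
      have h2 := hadj (i + d) (by omega) h1
      simpa [Nat.add_assoc] using h2
  intro i j hi hj hij hx
  have := hd (j - i) i (by omega) hx
  simpa [Nat.add_sub_cancel' hij] using this

-- ===== VERDICT (by name: the statement is the Claim_ definition above) =====
theorem check_spec : Claim_equal_check := by
  intro arr h_ _hdom hpre
  unfold Spec_check check
  rw [alt_eq_countP]
  exact loop_eq arr h_ (part_mono arr h_ hpre) (arr.length + 1) 0 ((arr.length : Int) - 1)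
    le_rfl (by omega) (by omega) (by omega)
    (by intro i hi h; omega)
    (by intro i hi h; omega)
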